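-- pv_equiv track=rewrite | github.com/Flodder23/Advent-of-Code-2020 | d_24_p1.py | ref2coords
-- ===== SOURCE A (Python) =====
-- def ref2coords(ref):
-- 	coords = [0, 0]
-- 	for d in ref:
-- 		if d == "e":
-- 			coords[0] += 1
-- 		elif d == "se":
-- 			coords[0] += 1
-- 			coords[1] -= 1
-- 		elif d == "sw":
-- 			coords[1] -= 1
-- 		elif d == "w":
-- 			coords[0] -= 1
-- 		elif d == "nw":
-- 			coords[0] -= 1
-- 			coords[1] += 1
-- 		elif d == "ne":
-- 			coords[1] += 1
-- 	return coords
-- ===== SOURCE B (Python) =====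
-- DELTA = {"e": (1, 0), "se": (1, -1), "sw": (0, -1),
--          "w": (-1, 0), "nw": (-1, 1), "ne": (0, 1)}
--
-- def ref2coords(ref):
--     if not ref:
--         return [0, 0]
--     if len(ref) == 1:
--         dx, dy = DELTA.get(ref[0], (0, 0))
--         return [dx, dy]
--     mid = len(ref) // 2
--     x1, y1 = ref2coords(ref[:mid])
--     x2, y2 = ref2coords(ref[mid:])
--     return [x1 + x2, y1 + y2]
-- ===== Notes on version B (the rewrite author's own statement) =====
-- stated objective: alternative
-- what changed: Replaces the linear branch-and-accumulate loop with a divide-and-conquer recursion: split the token list in half, recursively convert each half, and add the resulting coordinate pairs, with single tokens resolved through a lookup table instead of an if/elif chain.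
import Mathlib
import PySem

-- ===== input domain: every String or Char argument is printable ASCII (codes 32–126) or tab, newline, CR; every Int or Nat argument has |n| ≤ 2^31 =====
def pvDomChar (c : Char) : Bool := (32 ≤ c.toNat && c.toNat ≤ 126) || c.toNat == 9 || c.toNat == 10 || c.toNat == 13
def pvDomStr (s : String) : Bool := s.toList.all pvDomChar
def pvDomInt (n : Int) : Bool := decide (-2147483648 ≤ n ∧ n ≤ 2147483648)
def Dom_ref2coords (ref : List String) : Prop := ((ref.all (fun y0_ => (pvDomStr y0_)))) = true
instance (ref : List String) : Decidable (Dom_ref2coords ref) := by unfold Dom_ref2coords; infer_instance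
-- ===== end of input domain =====

-- B replaces A's linear branch-and-accumulate loop by a divide-and-conquer recursion
-- (split the list in half, convert each half, add the coordinate pairs; a single token
-- goes through a lookup table) — objective: alternative.

-- ===== PORT A =====
-- the mutable list coords = [0, 0] is carried as a pair (coords[0], coords[1])
def ref2coordsLoop (ref : List String) (coords : Int × Int) : Int × Int :=
  ref.foldl (fun c d =>
    if d = "e" then (c.1 + 1, c.2)
    else if d = "se" then (c.1 + 1, c.2 - 1)
    else if d = "sw" then (c.1, c.2 - 1)
    else if d = "w" then (c.1 - 1, c.2)
    else if d = "nw" then (c.1 - 1, c.2 + 1)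
    else if d = "ne" then (c.1, c.2 + 1)
    else c) coords

def ref2coords (ref : List String) : List Int :=
  let c := ref2coordsLoop ref (0, 0)
  [c.1, c.2]

-- ===== PORT B =====
-- the module-level dict DELTA of Source B
def DELTA : PySem.Dict String (Int × Int) :=
  PySem.Dict.ofList [("e", (1, 0)), ("se", (1, -1)), ("sw", (0, -1)),
                     ("w", (-1, 0)), ("nw", (-1, 1)), ("ne", (0, 1))]

-- DELTA.get(d, (0, 0)) of Source B
def deltaB (d : String) : Int × Int := DELTA.getD d (0, 0)

-- the halving recursion of Source B; the fuel argument (initially the length, and always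
-- ≥ the list length) only makes the recursion structural — the 0-with-≥2-elements branch
-- is unreachable
def ref2coordsGo : Nat → List String → List Int
  | _, [] => [0, 0]
  | _, [d] =>
    let p := deltaB d
    [p.1, p.2]
  | 0, _ :: _ :: _ => [0, 0]
  | n + 1, d1 :: d2 :: t =>
    let l := d1 :: d2 :: t
    let mid := l.length / 2
    let a := ref2coordsGo n (l.take mid)
    let b := ref2coordsGo n (l.drop mid)
    [a.headI + b.headI, a.tail.headI + b.tail.headI]

def ref2coords_alt (ref : List String) : List Int :=
  ref2coordsGo ref.length ref

-- ===== PRECONDITION & SPEC =====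
def Spec_ref2coords (ref : List String) (out : List Int) : Prop := out = ref2coords_alt ref
instance (ref : List String) (out : List Int) : Decidable (Spec_ref2coords ref out) := by unfold Spec_ref2coords; infer_instance

-- ===== CLAIM (what is proved, stated in full; the proofs are below) =====
def Claim_equal_ref2coords : Prop := ∀ (ref : List String), Dom_ref2coords ref → Spec_ref2coords ref (ref2coords ref)

-- ===== LEMMAS AND PROOFS =====

-- the summed delta of a token list (proof-only abstraction shared by both sides)
def sumD (l : List String) : Int × Int :=
  l.foldr (fun d acc => ((deltaB d).1 + acc.1, (deltaB d).2 + acc.2)) (0, 0)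

lemma sumD_nil : sumD [] = (0, 0) := rfl

lemma sumD_cons (d : String) (t : List String) :
    sumD (d :: t) = ((deltaB d).1 + (sumD t).1, (deltaB d).2 + (sumD t).2) := rfl

lemma deltaB_e : deltaB "e" = (1, 0) := by decide
lemma deltaB_se : deltaB "se" = (1, -1) := by decide
lemma deltaB_sw : deltaB "sw" = (0, -1) := by decide
lemma deltaB_w : deltaB "w" = (-1, 0) := by decide
lemma deltaB_nw : deltaB "nw" = (-1, 1) := by decide
lemma deltaB_ne : deltaB "ne" = (0, 1) := by decide

lemma deltaB_default (d : String) (h1 : d ≠ "e") (h2 : d ≠ "se") (h3 : d ≠ "sw")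
    (h4 : d ≠ "w") (h5 : d ≠ "nw") (h6 : d ≠ "ne") : deltaB d = (0, 0) := by
  have hD : DELTA = PySem.Dict.mk [("e", (1, 0)), ("se", (1, -1)), ("sw", (0, -1)),
      ("w", (-1, 0)), ("nw", (-1, 1)), ("ne", (0, 1))] := by decide
  simp [deltaB, hD, PySem.Dict.getD_eq_get?_getD, PySem.Dict.get?, beq_iff_eq, Ne.symm h1, Ne.symm h2, Ne.symm h3,
        Ne.symm h4, Ne.symm h5, Ne.symm h6]

lemma sumD_append (a b : List String) :
    sumD (a ++ b) = ((sumD a).1 + (sumD b).1, (sumD a).2 + (sumD b).2) := by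
  induction a with
  | nil => simp [sumD_nil]
  | cons d t ih =>
    simp only [List.cons_append, sumD_cons, ih]
    rw [Prod.ext_iff]
    constructor <;> dsimp <;> ring

lemma ref2coordsLoop_eq (ref : List String) (x y : Int) :
    ref2coordsLoop ref (x, y) = (x + (sumD ref).1, y + (sumD ref).2) := by
  induction ref generalizing x y with
  | nil => simp [ref2coordsLoop, sumD_nil]
  | cons d t ih =>
    simp only [ref2coordsLoop, List.foldl_cons] at *
    split_ifs with h1 h2 h3 h4 h5 h6
    · subst h1; rw [ih, sumD_cons, deltaB_e]; rw [Prod.ext_iff]; constructor <;> dsimp <;> ring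
    · subst h2; rw [ih, sumD_cons, deltaB_se]; rw [Prod.ext_iff]; constructor <;> dsimp <;> ring
    · subst h3; rw [ih, sumD_cons, deltaB_sw]; rw [Prod.ext_iff]; constructor <;> dsimp <;> ring
    · subst h4; rw [ih, sumD_cons, deltaB_w]; rw [Prod.ext_iff]; constructor <;> dsimp <;> ring
    · subst h5; rw [ih, sumD_cons, deltaB_nw]; rw [Prod.ext_iff]; constructor <;> dsimp <;> ring
    · subst h6; rw [ih, sumD_cons, deltaB_ne]; rw [Prod.ext_iff]; constructor <;> dsimp <;> ring
    · rw [ih, sumD_cons, deltaB_default d h1 h2 h3 h4 h5 h6]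
      rw [Prod.ext_iff]; constructor <;> dsimp <;> ring

lemma ref2coordsGo_eq : ∀ (n : Nat) (ref : List String), ref.length ≤ n →
    ref2coordsGo n ref = [(sumD ref).1, (sumD ref).2] := by
  intro n
  induction n with
  | zero =>
    intro ref h
    have hnil : ref = [] := by cases ref <;> simp_all
    subst hnil; simp [ref2coordsGo, sumD_nil]
  | succ n ih =>
    intro ref h
    match ref with
    | [] => simp [ref2coordsGo, sumD_nil]
    | [d] => simp [ref2coordsGo, sumD_cons, sumD_nil]
    | d1 :: d2 :: t =>
      have h' : t.length + 2 ≤ n + 1 := by simpa using h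
      rw [ref2coordsGo]
      have h1 : (List.take ((d1 :: d2 :: t).length / 2) (d1 :: d2 :: t)).length ≤ n := by
        simp only [List.length_take, List.length_cons]; omega
      have h2 : (List.drop ((d1 :: d2 :: t).length / 2) (d1 :: d2 :: t)).length ≤ n := by
        simp only [List.length_drop, List.length_cons]; omega
      rw [ih _ h1, ih _ h2]
      conv_rhs => rw [← List.take_append_drop ((d1 :: d2 :: t).length / 2) (d1 :: d2 :: t)]
      rw [sumD_append]
      simp

lemma ref2coords_alt_eq (ref : List String) :
    ref2coords_alt ref = [(sumD ref).1, (sumD ref).2] :=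
  ref2coordsGo_eq ref.length ref le_rfl

theorem ref2coords_spec : Claim_equal_ref2coords := by
  intro ref _
  unfold Spec_ref2coords ref2coords
  rw [ref2coordsLoop_eq, ref2coords_alt_eq]
  simp
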